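-- pv_equiv track=rewrite | github.com/snaveen1856/GTA_ref_repo | lib/performancecalc.py | findmaxvaluesfrombenchmark
-- ===== SOURCE A (Python) =====
-- def findmaxvaluesfrombenchmark(benchmarkdata):
--     '''Finds the max response times from benchmark times.
--
--     - **parameters**, **types**, **return** and **return types**::
--             :param benchmarkdata: benchmarkdata
--             :type benchmarkdata: dictionary
--             :return: Returns input values as dictionary
--             :rtype: dictionary
--
--     '''
--     benchmark = {}
--     #reads the dictionary adn finds the maximum value of times
--     #associated with same type and name.
--     for keys, values in list(benchmarkdata.items()):
--         maxlist = []
--         for value in values: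
--             value = value.split(',')
--             if value[0] in benchmark:
--                 values = [benchmark[value[0]]]
--                 values.append(value[-1])
--                 benchmark[value[0]] = max(values)
--             else:
--                 benchmark[value[0]] = value[-1]
--
--     return benchmark
-- ===== SOURCE B (Python) =====
-- def findmaxvaluesfrombenchmark(benchmarkdata):
--     '''Grouping-then-reduce: build a table of all time strings per key, then take each group's max.'''
--     groups = {}
--     for values in benchmarkdata.values():
--         for value in values:
--             parts = value.split(',')
--             groups.setdefault(parts[0], []).append(parts[-1])
--     return {k: max(v) for k, v in groups.items()}
-- ===== Notes on version B (the rewrite author's own statement) =====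
-- stated objective: alternative
-- what changed: Replaces A's one-pass running-max tracking (inline compare-and-overwrite per entry) by a two-phase grouping-then-reduce: first build a dict mapping each key to the list of all its time strings, then take the lexical max of each group in a final comprehension.
import Mathlib
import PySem

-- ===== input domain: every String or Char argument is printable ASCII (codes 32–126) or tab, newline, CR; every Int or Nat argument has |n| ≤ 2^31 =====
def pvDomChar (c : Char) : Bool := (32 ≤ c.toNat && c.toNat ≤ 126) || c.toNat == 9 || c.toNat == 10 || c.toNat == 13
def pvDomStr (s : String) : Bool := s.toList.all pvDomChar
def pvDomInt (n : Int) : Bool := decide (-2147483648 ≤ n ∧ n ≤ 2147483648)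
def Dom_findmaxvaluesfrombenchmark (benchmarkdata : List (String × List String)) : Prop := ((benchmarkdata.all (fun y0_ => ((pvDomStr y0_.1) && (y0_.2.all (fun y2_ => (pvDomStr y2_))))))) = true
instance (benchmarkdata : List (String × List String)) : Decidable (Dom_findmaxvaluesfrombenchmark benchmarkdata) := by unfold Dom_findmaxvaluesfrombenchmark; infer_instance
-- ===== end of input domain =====

-- B replaces A's one-pass running-max tracking by a two-phase grouping (key → list of its time
-- strings) followed by a per-group lexical max; equal return value proved on all inputs.

-- ===== PORT A =====
-- loop body of A's inner 'for value in values' (the outer 'maxlist = []' is dead code)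
def pvStepA (benchmark : PySem.Dict String String) (value : String) : PySem.Dict String String :=
  let parts := (PySem.Str.split? value ",").getD []  -- value.split(','): sep ≠ "", never none
  let k := parts.headD ""          -- value[0]; split(',') never returns [], so exact
  let last := parts.getLastD ""    -- value[-1]; same
  if benchmark.contains k then
    -- values = [benchmark[value[0]]]; values.append(value[-1]); benchmark[value[0]] = max(values)
    benchmark.insert k ((PySem.List.max? ([benchmark.getD k ""] ++ [last]) (fun x => x)).getD "")
  else
    benchmark.insert k last

def findmaxvaluesfrombenchmark (benchmarkdata : List (String × List String)) : List (String × String) :=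
  (benchmarkdata.foldl (fun (benchmark : PySem.Dict String String) kv =>
    kv.2.foldl pvStepA benchmark) PySem.Dict.empty).items

-- ===== PORT B =====
-- loop body of B's inner loop: groups.setdefault(parts[0], []).append(parts[-1])
def pvStepB (g : PySem.Dict String (List String)) (value : String) : PySem.Dict String (List String) :=
  let parts := (PySem.Str.split? value ",").getD []  -- value.split(','): sep ≠ "", never none
  g.modify (parts.headD "") [] (fun l => l ++ [parts.getLastD ""])

def findmaxvaluesfrombenchmark_alt (benchmarkdata : List (String × List String)) : List (String × String) :=
  let groups : PySem.Dict String (List String) :=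
    benchmarkdata.foldl (fun g kv => kv.2.foldl pvStepB g) PySem.Dict.empty
  -- {k: max(v) for k, v in groups.items()}; every group is nonempty so max(v) never raises
  groups.items.map (fun p => (p.1, (PySem.List.max? p.2 (fun x => x)).getD ""))

-- ===== PRECONDITION & SPEC =====
def Spec_findmaxvaluesfrombenchmark (benchmarkdata : List (String × List String)) (out : List (String × String)) : Prop := out = findmaxvaluesfrombenchmark_alt benchmarkdata
instance (benchmarkdata : List (String × List String)) (out : List (String × String)) : Decidable (Spec_findmaxvaluesfrombenchmark benchmarkdata out) := by unfold Spec_findmaxvaluesfrombenchmark; infer_instance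

-- ===== CLAIM (what is proved, stated in full; the proofs are below) =====
def Claim_equal_findmaxvaluesfrombenchmark : Prop := ∀ (benchmarkdata : List (String × List String)), Dom_findmaxvaluesfrombenchmark benchmarkdata → Spec_findmaxvaluesfrombenchmark benchmarkdata (findmaxvaluesfrombenchmark benchmarkdata)

-- ===== LEMMAS AND PROOFS =====

/-- max of a String list with default "" (Python's max, first maximal on ties). -/
def rmax (l : List String) : String := (PySem.List.max? l (fun x => x)).getD ""

/-- B's group dict viewed through the per-group max: exactly the dict A maintains. -/
def mapd (g : PySem.Dict String (List String)) : PySem.Dict String String :=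
  PySem.Dict.mk (g.items.map (fun p => (p.1, rmax p.2)))

lemma items_mapd (g : PySem.Dict String (List String)) :
    (mapd g).items = g.items.map (fun p => (p.1, rmax p.2)) := rfl

lemma empty_lt_of_ne (s : String) (h : s ≠ "") : "" < s := by
  rw [String.lt_iff_toList_lt]
  cases hs : s.toList with
  | nil => exact absurd (by simpa using congrArg String.ofList hs) h
  | cons c t => exact hs ▸ List.nil_lt_cons c t

lemma max2 (a b : String) :
    (PySem.List.max? ([a] ++ [b]) (fun x => x)).getD "" = if a < b then b else a := by
  rw [List.singleton_append, PySem.List.max?_id_cons]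
  rw [List.foldl_cons, List.foldl_nil, Option.getD_some]
  rcases lt_or_ge a b with h | h
  · rw [if_pos h, max_eq_right h.le]
  · rw [if_neg (not_lt_of_ge h), max_eq_left h]

lemma rmax_singleton (x : String) : rmax [x] = x := by
  rw [rmax, PySem.List.max?_id_cons, List.foldl_nil, Option.getD_some]

lemma rmax_append (l : List String) (x : String) :
    rmax (l ++ [x]) = if rmax l < x then x else rmax l := by
  cases l with
  | nil =>
      rw [List.nil_append, rmax_singleton]
      have hre : rmax ([] : List String) = "" := rfl
      rw [hre]
      by_cases hx : x = ""
      · subst hx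
        rw [if_neg (lt_irrefl _)]
      · rw [if_pos (empty_lt_of_ne x hx)]
  | cons y t =>
      rw [rmax, rmax, List.cons_append, PySem.List.max?_id_cons, PySem.List.max?_id_cons,
        Option.getD_some, Option.getD_some, List.foldl_append, List.foldl_cons, List.foldl_nil]
      rcases lt_or_ge (List.foldl max y t) x with h | h
      · rw [if_pos h, max_eq_right h.le]
      · rw [if_neg (not_lt_of_ge h), max_eq_left h]

lemma contains_mapd (g : PySem.Dict String (List String)) (k : String) :
    (mapd g).contains k = g.contains k := by
  show (g.items.map (fun p => (p.1, rmax p.2))).any (fun p => p.1 == k)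
      = g.items.any (fun p => p.1 == k)
  rw [List.any_map]
  rfl

lemma get?_mapd (g : PySem.Dict String (List String)) (k : String) :
    (mapd g).get? k = (g.get? k).map rmax := by
  show ((g.items.map (fun p => (p.1, rmax p.2))).find? (fun p => p.1 == k)).map (·.2)
      = ((g.items.find? (fun p => p.1 == k)).map (·.2)).map rmax
  rw [List.find?_map, Option.map_map, Option.map_map]
  rfl

lemma getD_mapd (g : PySem.Dict String (List String)) (k : String) :
    (mapd g).getD k "" = rmax (g.getD k []) := by
  rw [PySem.Dict.getD_eq_get?_getD, PySem.Dict.getD_eq_get?_getD, get?_mapd]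
  cases g.get? k <;> rfl

lemma mapd_insert (g : PySem.Dict String (List String)) (k : String) (v : List String) :
    mapd (g.insert k v) = (mapd g).insert k (rmax v) := by
  apply PySem.Dict.ext
  by_cases hc : g.contains k = true
  · have hc' : (mapd g).contains k = true := by rw [contains_mapd]; exact hc
    rw [items_mapd, PySem.Dict.items_insert_of_contains g v hc,
      PySem.Dict.items_insert_of_contains (mapd g) (rmax v) hc', items_mapd,
      List.map_map, List.map_map]
    apply List.map_congr_left
    intro p _
    by_cases hp : (p.1 == k) = true
    · simp only [Function.comp_apply, hp, if_pos]
    · simp only [Function.comp_apply, hp]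
      rw [if_neg (by simpa using hp), if_neg (by simpa using hp)]
  · have hcf : g.contains k = false := by simpa using hc
    have hcf' : (mapd g).contains k = false := by rw [contains_mapd]; exact hcf
    rw [items_mapd, PySem.Dict.items_insert_of_not_contains g v hcf,
      PySem.Dict.items_insert_of_not_contains (mapd g) (rmax v) hcf', items_mapd,
      List.map_append]
    rfl

lemma step_eq (g : PySem.Dict String (List String)) (value : String) :
    pvStepA (mapd g) value = mapd (pvStepB g value) := by
  unfold pvStepA pvStepB
  simp only [max2]
  set parts := (PySem.Str.split? value ",").getD [] with hp
  set k := parts.headD "" with hk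
  set last := parts.getLastD "" with hl
  have hmod : g.modify k [] (fun l => l ++ [last]) = g.insert k (g.getD k [] ++ [last]) := rfl
  rw [hmod, mapd_insert, rmax_append, contains_mapd, getD_mapd]
  by_cases hc : g.contains k = true
  · rw [if_pos hc]
  · rw [if_neg hc]
    have hz : g.getD k ([] : List String) = [] :=
      PySem.Dict.getD_of_not_contains g [] (by simpa using hc)
    rw [hz]
    have hre : rmax ([] : List String) = "" := rfl
    rw [hre]
    by_cases h : last = ""
    · rw [h, if_neg (lt_irrefl _)]
    · rw [if_pos (empty_lt_of_ne last h)]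

lemma inner_eq (vs : List String) (g : PySem.Dict String (List String)) :
    vs.foldl pvStepA (mapd g) = mapd (vs.foldl pvStepB g) := by
  induction vs generalizing g with
  | nil => rfl
  | cons v t ih =>
      rw [List.foldl_cons, List.foldl_cons, step_eq]
      exact ih _

lemma outer_eq (bd : List (String × List String)) (g : PySem.Dict String (List String)) :
    bd.foldl (fun (benchmark : PySem.Dict String String) kv =>
      kv.2.foldl pvStepA benchmark) (mapd g)
    = mapd (bd.foldl (fun g kv => kv.2.foldl pvStepB g) g) := by
  induction bd generalizing g with
  | nil => rfl
  | cons kv t ih =>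
      rw [List.foldl_cons, List.foldl_cons]
      show List.foldl _ (kv.2.foldl pvStepA (mapd g)) t = _
      rw [inner_eq kv.2 g]
      exact ih _

-- ===== VERDICT (by name: the statement is the Claim_ definition above) =====
theorem findmaxvaluesfrombenchmark_spec : Claim_equal_findmaxvaluesfrombenchmark := by
  intro bd _
  show findmaxvaluesfrombenchmark bd = findmaxvaluesfrombenchmark_alt bd
  unfold findmaxvaluesfrombenchmark findmaxvaluesfrombenchmark_alt
  rw [show (PySem.Dict.empty : PySem.Dict String String) = mapd PySem.Dict.empty from rfl,
    outer_eq]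
  rfl
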